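-- pv_equiv track=rewrite | github.com/cyrsiansk/psparser | classes/PartySlateProvider.py | get_next_data_type_string
-- ===== SOURCE A (Python) =====
-- def get_next_data_type_string(s: str) -> str:
--     res = ""
--     alpha_stop = "\"{[n"
--     for c in s:
--         if c == "T":
--             return "T"
--         if c in alpha_stop:
--             break
--         else:
--             res += c
--     return res
-- ===== SOURCE B (Python) =====
-- def get_next_data_type_string(s: str) -> str:
--     # Find the earliest occurrence of any special character via per-char find,
--     # instead of scanning character by character while building a prefix.
--     best = -1
--     bestc = ''
--     for ch in 'T"{[n':
--         i = s.find(ch)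
--         if i != -1 and (best == -1 or i < best):
--             best = i
--             bestc = ch
--     if best == -1:
--         return s
--     if bestc == 'T':
--         return 'T'
--     return s[:best]
-- ===== Notes on version B (the rewrite author's own statement) =====
-- stated objective: faster
-- what changed: Instead of a Python-level char-by-char scan that accumulates a prefix string, B locates the earliest occurrence of any of the five stop characters with one str.find call per stop char (minimum of the non-negative results) and returns the whole string, the tag character, or one slice accordingly.
import Mathlib
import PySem

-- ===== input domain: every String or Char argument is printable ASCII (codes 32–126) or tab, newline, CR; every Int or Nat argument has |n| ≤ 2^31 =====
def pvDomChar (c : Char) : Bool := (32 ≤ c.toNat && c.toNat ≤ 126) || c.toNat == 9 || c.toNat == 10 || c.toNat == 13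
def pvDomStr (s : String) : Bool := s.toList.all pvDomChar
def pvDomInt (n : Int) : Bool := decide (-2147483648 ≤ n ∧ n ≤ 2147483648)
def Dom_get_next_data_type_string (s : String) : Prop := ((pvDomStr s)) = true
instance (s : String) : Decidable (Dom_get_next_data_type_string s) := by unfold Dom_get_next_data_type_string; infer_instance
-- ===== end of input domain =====

-- B replaces A's char-by-char accumulating scan with five s.find calls (one per stop
-- character), takes the minimum found index, and returns s / "T" / the slice s[:best].

-- ===== PORT A =====
-- the loop 'for c in s: …' with accumulator res, transcribed as structural recursion
def pvAGo : List Char → List Char → String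
  | [], res => String.ofList res
  | c :: rest, res =>
    if c = 'T' then "T"
    else if PySem.Chars.isIn [c] ['"', '{', '[', 'n'] then String.ofList res
    else pvAGo rest (res ++ [c])

def get_next_data_type_string (s : String) : String := pvAGo s.toList []

-- ===== PORT B =====
-- per-delimiter find loop: fold over the delimiter alphabet tracking (best, bestc)
def pvBStep (s : List Char) (st : Int × Char) (ch : Char) : Int × Char :=
  let i := PySem.Chars.find s [ch]
  if i ≠ -1 ∧ (st.1 = -1 ∨ i < st.1) then (i, ch) else st

def get_next_data_type_string_alt (s : String) : String :=
  let p := ['T', '"', '{', '[', 'n'].foldl (pvBStep s.toList) (-1, ' ')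
  if p.1 = -1 then s
  else if p.2 = 'T' then "T"
  else String.ofList (PySem.List.slice s.toList none (some p.1))

-- ===== PRECONDITION & SPEC =====
def Spec_get_next_data_type_string (s : String) (out : String) : Prop := out = get_next_data_type_string_alt s
instance (s : String) (out : String) : Decidable (Spec_get_next_data_type_string s out) := by unfold Spec_get_next_data_type_string; infer_instance

-- ===== CLAIM (what is proved, stated in full; the proofs are below) =====
def Claim_equal_get_next_data_type_string : Prop := ∀ (s : String), Dom_get_next_data_type_string s → Spec_get_next_data_type_string s (get_next_data_type_string s)

-- ===== LEMMAS AND PROOFS =====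

-- first index of d in cs, -1 if absent (proof-side characterisation of find for a 1-char needle)
def pvFnd (cs : List Char) (d : Char) : Int :=
  match cs.findIdx? (· = d) with
  | none => -1
  | some k => (k : Int)

-- the state transformer a leading non-delimiter char applies to (best, bestc)
def pvShift (st : Int × Char) : Int × Char :=
  if st.1 = -1 then st else (st.1 + 1, st.2)

lemma pvFnd_nil (d : Char) : pvFnd [] d = -1 := rfl

lemma pvFnd_cons (c : Char) (cs : List Char) (d : Char) :
    pvFnd (c :: cs) d =
      if c = d then 0 else if pvFnd cs d = -1 then -1 else pvFnd cs d + 1 := by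
  unfold pvFnd
  rw [List.findIdx?_cons]
  by_cases h : c = d
  · simp [h]
  · cases hfi : cs.findIdx? (· = d) with
    | none => simp [h, hfi]
    | some k => simp [h]

lemma pvFnd_ge (cs : List Char) (d : Char) : -1 ≤ pvFnd cs d := by
  unfold pvFnd
  cases cs.findIdx? (· = d) <;> simp

lemma pvFind_go_eq (d : Char) (cs : List Char) (i : Nat) :
    PySem.Chars.find.go [d] cs i =
      if pvFnd cs d = -1 then -1 else (i : Int) + pvFnd cs d := by
  induction cs generalizing i with
  | nil => simp [PySem.Chars.find.go, pvFnd_nil]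
  | cons c cs ih =>
    rw [pvFnd_cons]
    have hge := pvFnd_ge cs d
    simp only [PySem.Chars.find.go, List.isPrefixOf_iff_prefix, List.cons_prefix_cons,
      List.nil_prefix, and_true]
    by_cases h : d = c
    · simp [h]
    · have h' : ¬ c = d := fun hc => h hc.symm
      rw [if_neg h, ih (i + 1), if_neg h']
      split_ifs <;> push_cast <;> omega

lemma pvFind_eq (cs : List Char) (d : Char) :
    PySem.Chars.find cs [d] = pvFnd cs d := by
  have h := pvFind_go_eq d cs 0
  have hge := pvFnd_ge cs d
  simp only [PySem.Chars.find]
  rw [h]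
  split_ifs with hh <;> omega

lemma pvStep_ge (cs : List Char) (st : Int × Char) (d : Char) (h : -1 ≤ st.1) :
    -1 ≤ (pvBStep cs st d).1 := by
  have := pvFnd_ge cs d
  simp only [pvBStep, pvFind_eq]
  split_ifs <;> simp_all

lemma pvFold_ge (cs : List Char) (D : List Char) :
    ∀ st : Int × Char, -1 ≤ st.1 → -1 ≤ (D.foldl (pvBStep cs) st).1 := by
  induction D with
  | nil => intro st h; simpa using h
  | cons d D ih =>
    intro st h
    rw [List.foldl_cons]
    exact ih _ (pvStep_ge cs st d h)

lemma pvFold_keep0 (cs : List Char) (D : List Char) :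
    ∀ st : Int × Char, st.1 = 0 → D.foldl (pvBStep cs) st = st := by
  induction D with
  | nil => intro st _; rfl
  | cons d D ih =>
    intro st h
    rw [List.foldl_cons]
    have hge := pvFnd_ge cs d
    have hstep : pvBStep cs st d = st := by
      simp only [pvBStep, pvFind_eq]
      split_ifs with hcond
      · exfalso; omega
      · rfl
    rw [hstep]
    exact ih st h

lemma pvStep_shift (cs : List Char) (c d : Char) (hd : d ≠ c) (st : Int × Char)
    (h : -1 ≤ st.1) :
    pvBStep (c :: cs) (pvShift st) d = pvShift (pvBStep cs st d) := by
  have hge := pvFnd_ge cs d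
  simp only [pvBStep, pvShift, pvFind_eq, pvFnd_cons, if_neg (fun hh => hd (Eq.symm hh))]
  split_ifs <;> simp_all <;> omega

lemma pvFold_shift (cs : List Char) (c : Char) (D : List Char) (hc : c ∉ D) :
    ∀ st : Int × Char, -1 ≤ st.1 →
      D.foldl (pvBStep (c :: cs)) (pvShift st) = pvShift (D.foldl (pvBStep cs) st) := by
  induction D with
  | nil => intro st _; rfl
  | cons d D ih =>
    intro st h
    simp only [List.mem_cons, not_or] at hc
    rw [List.foldl_cons, List.foldl_cons,
      pvStep_shift cs c d (fun hh => hc.1 hh.symm) st h]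
    exact ih hc.2 _ (pvStep_ge cs st d h)

lemma pvShift_init : pvShift ((-1 : Int), ' ') = ((-1 : Int), ' ') := by
  simp [pvShift]

-- the fold hits delimiter c (a char of the string's head position): result is (0, c)
lemma pvHit (cs : List Char) (c : Char) (D0 D1 : List Char) (hc : c ∉ D0) :
    (D0 ++ c :: D1).foldl (pvBStep (c :: cs)) ((-1 : Int), ' ') = (0, c) := by
  rw [List.foldl_append]
  have h0 := pvFold_shift cs c D0 hc ((-1 : Int), ' ') (by norm_num)
  rw [pvShift_init] at h0
  rw [h0]
  have hge : -1 ≤ (D0.foldl (pvBStep cs) ((-1 : Int), ' ')).1 :=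
    pvFold_ge cs D0 _ (by norm_num)
  set st := D0.foldl (pvBStep cs) ((-1 : Int), ' ') with hst
  rw [List.foldl_cons]
  have hstep : pvBStep (c :: cs) (pvShift st) c = (0, c) := by
    simp only [pvBStep, pvShift, pvFind_eq, pvFnd_cons]
    split_ifs <;> simp_all <;> omega
  rw [hstep]
  exact pvFold_keep0 (c :: cs) D1 _ rfl

-- the main invariant: A's accumulating scan equals B's branch on the minimal find
lemma pvMain (cs : List Char) : ∀ res : List Char,
    pvAGo cs res =
      (let p := ['T', '"', '{', '[', 'n'].foldl (pvBStep cs) (-1, ' ')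
       if p.1 = -1 then String.ofList (res ++ cs)
       else if p.2 = 'T' then "T"
       else String.ofList (res ++ cs.take p.1.toNat)) := by
  induction cs with
  | nil =>
    intro res
    simp [pvAGo, pvBStep, List.foldl, pvFind_eq, pvFnd_nil]
  | cons c cs ih =>
    intro res
    by_cases h1 : c = 'T'
    · subst h1
      rw [show (['T', '"', '{', '[', 'n'] : List Char)
            = [] ++ 'T' :: ['"', '{', '[', 'n'] from rfl]
      rw [pvHit cs 'T' [] ['"', '{', '[', 'n'] (by simp)]
      simp [pvAGo]
    · by_cases h2 : c ∈ (['"', '{', '[', 'n'] : List Char)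
      · have hc : PySem.Chars.isIn [c] ['"', '{', '[', 'n'] = true := by
          rw [PySem.Chars.isIn_iff_infix, List.singleton_infix_iff]; exact h2
        fin_cases h2
        · rw [show (['T', '"', '{', '[', 'n'] : List Char)
              = ['T'] ++ '"' :: ['{', '[', 'n'] from rfl,
            pvHit cs '"' ['T'] ['{', '[', 'n'] (by decide)]
          simp [pvAGo, hc]
        · rw [show (['T', '"', '{', '[', 'n'] : List Char)
              = ['T', '"'] ++ '{' :: ['[', 'n'] from rfl,
            pvHit cs '{' ['T', '"'] ['[', 'n'] (by decide)]
          simp [pvAGo, hc]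
        · rw [show (['T', '"', '{', '[', 'n'] : List Char)
              = ['T', '"', '{'] ++ '[' :: ['n'] from rfl,
            pvHit cs '[' ['T', '"', '{'] ['n'] (by decide)]
          simp [pvAGo, hc]
        · rw [show (['T', '"', '{', '[', 'n'] : List Char)
              = ['T', '"', '{', '['] ++ 'n' :: [] from rfl,
            pvHit cs 'n' ['T', '"', '{', '['] [] (by decide)]
          simp [pvAGo, hc]
      · have hc : PySem.Chars.isIn [c] ['"', '{', '[', 'n'] = false := by
          rw [PySem.Chars.isIn_eq_false_iff, List.singleton_infix_iff]; exact h2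
        have hnotin : c ∉ (['T', '"', '{', '[', 'n'] : List Char) := by
          simp only [List.mem_cons, not_or] at h2 ⊢
          exact ⟨h1, h2⟩
        have hfold : (['T', '"', '{', '[', 'n'] : List Char).foldl
              (pvBStep (c :: cs)) ((-1 : Int), ' ')
            = pvShift ((['T', '"', '{', '[', 'n'] : List Char).foldl
              (pvBStep cs) ((-1 : Int), ' ')) := by
          have h0 := pvFold_shift cs c _ hnotin ((-1 : Int), ' ') (by norm_num)
          rw [pvShift_init] at h0
          exact h0
        have hge : -1 ≤ ((['T', '"', '{', '[', 'n'] : List Char).foldl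
            (pvBStep cs) ((-1 : Int), ' ')).1 := pvFold_ge cs _ _ (by norm_num)
        simp only [pvAGo, if_neg h1, hc, Bool.false_eq_true, if_false]
        rw [ih (res ++ [c])]
        simp only [hfold]
        set q := (['T', '"', '{', '[', 'n'] : List Char).foldl
          (pvBStep cs) ((-1 : Int), ' ') with hq
        by_cases hm : q.1 = -1
        · simp [pvShift, hm]
        · have h0 : 0 ≤ q.1 := by omega
          have htn : (q.1 + 1).toNat = q.1.toNat + 1 := by omega
          simp only [pvShift, if_neg hm]
          rw [if_neg (by omega : ¬ q.1 + 1 = -1)]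
          by_cases hT : q.2 = 'T'
          · simp [hT]
          · simp only [if_neg hT, htn, List.take_succ_cons]
            simp

-- the fold's best index is -1 or a genuine (nonnegative) index
lemma pvFold_fst_ge (cs : List Char) :
    -1 ≤ ((['T', '"', '{', '[', 'n'] : List Char).foldl (pvBStep cs) (-1, ' ')).1 :=
  pvFold_ge cs _ _ (by norm_num)

-- ===== VERDICT (by name: the statement is the Claim_ definition above) =====
theorem get_next_data_type_string_spec : Claim_equal_get_next_data_type_string := by
  intro s _
  unfold Spec_get_next_data_type_string get_next_data_type_string get_next_data_type_string_alt
  rw [pvMain s.toList []]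
  simp only [List.nil_append]
  have hge := pvFold_fst_ge s.toList
  split_ifs with hm hT
  · exact String.ofList_toList
  · rfl
  · rw [PySem.List.slice_to
      (b := ((['T', '"', '{', '[', 'n'] : List Char).foldl (pvBStep s.toList) (-1, ' ')).1)
      s.toList (by omega)]
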